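-- pv_equiv track=rewrite | github.com/h-spear/problem-solving-python | baekjoon/math/cocktail.py | taste
-- ===== SOURCE A (Python) =====
-- def taste(ts: list) -> int:
--     odd = []
--     even = []
--     answer = 1
--     for t in ts:
--         if t % 2 == 0:
--             even.append(t)
--         else:
--             odd.append(t)
--
--     if len(odd) == 0:
--         for x in even:
--             answer *= x
--     else:
--         for x in odd:
--             answer *= x
--     return answer
-- ===== SOURCE B (Python) =====
-- def taste(ts: list) -> int:
--     odd_prod = 1
--     even_prod = 1
--     has_odd = False
--     for t in ts:
--         if t % 2 == 0:
--             even_prod *= t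
--         else:
--             odd_prod *= t
--             has_odd = True
--     return odd_prod if has_odd else even_prod
-- ===== Notes on version B (the rewrite author's own statement) =====
-- stated objective: simpler
-- what changed: Replaces partition-into-two-lists plus a second product loop by a single accumulating pass keeping two running products and a has-odd flag, with no intermediate lists.
import Mathlib
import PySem

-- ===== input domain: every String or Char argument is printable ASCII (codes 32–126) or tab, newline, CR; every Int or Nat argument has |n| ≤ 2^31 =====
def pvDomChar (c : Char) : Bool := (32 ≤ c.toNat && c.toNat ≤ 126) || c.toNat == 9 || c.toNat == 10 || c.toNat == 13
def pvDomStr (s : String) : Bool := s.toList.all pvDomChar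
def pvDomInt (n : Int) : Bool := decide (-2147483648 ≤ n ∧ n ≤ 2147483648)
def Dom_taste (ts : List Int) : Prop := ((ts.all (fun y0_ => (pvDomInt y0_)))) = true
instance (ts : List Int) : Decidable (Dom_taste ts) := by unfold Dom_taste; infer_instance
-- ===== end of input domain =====

-- B replaces A's partition-into-two-lists plus second product loop by one pass keeping two running products and a has-odd flag (objective: simpler).

-- ===== PORT A =====
def taste (ts : List Int) : Int :=
  let p := ts.foldl
    (fun (acc : List Int × List Int) t =>
      if PySem.Int.mod t 2 == 0 then (acc.1, acc.2 ++ [t]) else (acc.1 ++ [t], acc.2))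
    ([], [])
  if p.1.length = 0 then p.2.foldl (fun a x => a * x) 1
  else p.1.foldl (fun a x => a * x) 1

-- ===== PORT B =====
def taste_alt (ts : List Int) : Int :=
  let s := ts.foldl
    (fun (acc : Int × Int × Bool) t =>
      if PySem.Int.mod t 2 == 0 then (acc.1, acc.2.1 * t, acc.2.2)
      else (acc.1 * t, acc.2.1, true))
    (1, 1, false)
  if s.2.2 then s.1 else s.2.1

-- ===== PRECONDITION & SPEC =====
def Spec_taste (ts : List Int) (out : Int) : Prop := out = taste_alt ts
instance (ts : List Int) (out : Int) : Decidable (Spec_taste ts out) := by unfold Spec_taste; infer_instance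

-- ===== CLAIM (what is proved, stated in full; the proofs are below) =====
def Claim_equal_taste : Prop := ∀ (ts : List Int), Dom_taste ts → Spec_taste ts (taste ts)

-- ===== LEMMAS AND PROOFS =====
-- invariant: B's running state is (product of odds so far, product of evens so far, some odd seen)
theorem taste_key (ts odd even : List Int) :
    ts.foldl
      (fun (acc : Int × Int × Bool) t =>
        if PySem.Int.mod t 2 == 0 then (acc.1, acc.2.1 * t, acc.2.2)
        else (acc.1 * t, acc.2.1, true))
      (odd.foldl (fun a x => a * x) 1, even.foldl (fun a x => a * x) 1, !odd.isEmpty) =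
    (let p := ts.foldl
      (fun (acc : List Int × List Int) t =>
        if PySem.Int.mod t 2 == 0 then (acc.1, acc.2 ++ [t]) else (acc.1 ++ [t], acc.2))
      (odd, even);
     (p.1.foldl (fun a x => a * x) 1, p.2.foldl (fun a x => a * x) 1, !p.1.isEmpty)) := by
  induction ts generalizing odd even with
  | nil => simp
  | cons t ts ih =>
    simp only [List.foldl_cons]
    by_cases h : (PySem.Int.mod t 2 == 0) = true
    · rw [if_pos h, if_pos h]
      have hp := ih odd (even ++ [t])
      simp only [List.foldl_append, List.foldl_cons, List.foldl_nil] at hp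
      exact hp
    · rw [if_neg h, if_neg h]
      have hp := ih (odd ++ [t]) even
      simp only [List.foldl_append, List.foldl_cons, List.foldl_nil] at hp
      have he : (!(odd ++ [t]).isEmpty) = true := by simp
      rw [he] at hp
      exact hp

-- ===== VERDICT (by name: the statement is the Claim_ definition above) =====
theorem taste_spec : Claim_equal_taste := by
  intro ts _
  unfold Spec_taste taste taste_alt
  have h := taste_key ts [] []
  simp only [List.foldl_nil, List.isEmpty_nil, Bool.not_true] at h
  rw [h]
  simp only [List.length_eq_zero_iff]
  rcases (ts.foldl
      (fun (acc : List Int × List Int) t =>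
        if PySem.Int.mod t 2 == 0 then (acc.1, acc.2 ++ [t]) else (acc.1 ++ [t], acc.2))
      ([], [])) with ⟨o, e⟩
  by_cases ho : o = [] <;> simp [ho]
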